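-- pv_equiv track=rewrite | github.com/carrtesy/TSAD | data/load_data.py | load_anomaly_intervals
-- ===== SOURCE A (Python) =====
-- def load_anomaly_intervals(anomaly_labels, window_size):
--     window_y = []
--     for i in range(len(anomaly_labels)):
--         window_y.append(max(anomaly_labels[i:i + window_size]) == 1)
--
--     intervals = []
--     start = None
--     for i, label in enumerate(window_y):
--         if label:
--             if start is None:
--                 start = i
--         else:
--             if start is not None:
--                 intervals.append((start, i - 1))
--             start = None
--     if start is not None:
--         intervals.append((start, len(window_y) - 1))
--
--     return intervals
-- ===== SOURCE B (Python) =====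
-- def load_anomaly_intervals(anomaly_labels, window_size):
--     # One right-to-left pass: maintain the next index holding exactly 1 and the
--     # next index holding a value > 1; the window max equals 1 iff a 1 occurs
--     # before the window end and nothing larger does.  Runs are closed on the
--     # fly (collected back-to-front, reversed once at the end).
--     n = len(anomaly_labels)
--     n1 = n  # smallest index j >= i with anomaly_labels[j] == 1 (n if none)
--     nb = n  # smallest index j >= i with anomaly_labels[j] > 1 (n if none)
--     end_run = None  # right end of the run of anomalous windows currently open
--     rev = []
--     for i in range(n - 1, -1, -1):
--         x = anomaly_labels[i]
--         if x == 1: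
--             n1 = i
--         if x > 1:
--             nb = i
--         end = min(i + window_size, n)
--         y = n1 < end and end <= nb
--         if y:
--             if end_run is None:
--                 end_run = i
--         else:
--             if end_run is not None:
--                 rev.append((i + 1, end_run))
--                 end_run = None
--     if end_run is not None:
--         rev.append((0, end_run))
--     rev.reverse()
--     return rev
-- ===== Notes on version B (the rewrite author's own statement) =====
-- stated objective: faster
-- what changed: A recomputes max(labels[i:i+w]) for every index (O(n·w)); B makes one right-to-left pass tracking the next index holding exactly 1 and the next index holding a value > 1 (window max == 1 iff a 1 occurs before the window end and nothing larger does) and closes the anomaly runs on the fly, collecting them back-to-front and reversing once.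
import Mathlib
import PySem

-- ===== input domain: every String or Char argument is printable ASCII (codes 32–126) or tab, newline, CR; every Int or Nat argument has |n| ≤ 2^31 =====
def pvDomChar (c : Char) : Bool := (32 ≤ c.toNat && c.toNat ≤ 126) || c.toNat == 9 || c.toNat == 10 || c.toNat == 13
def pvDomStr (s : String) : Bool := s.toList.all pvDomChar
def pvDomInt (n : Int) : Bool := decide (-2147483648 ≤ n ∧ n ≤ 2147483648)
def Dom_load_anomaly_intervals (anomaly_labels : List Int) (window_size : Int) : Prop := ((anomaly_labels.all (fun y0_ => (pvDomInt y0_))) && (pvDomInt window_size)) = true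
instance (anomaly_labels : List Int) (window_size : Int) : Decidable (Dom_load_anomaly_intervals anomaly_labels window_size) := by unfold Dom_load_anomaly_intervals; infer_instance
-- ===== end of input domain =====

-- B replaces A's per-index slice maximum (O(n·w)) by one right-to-left pass tracking the next
-- index holding 1 and the next index holding a value > 1, closing the anomaly runs on the fly
-- (objective: faster, asymptotic O(n)).

-- ===== PORT A =====
-- state step of A's second loop (intervals, start)
def aStep (st : List (Int × Int) × Option Int) (p : Int × Bool) : List (Int × Int) × Option Int :=
  if p.2 then
    match st.2 with
    | none => (st.1, some p.1)
    | some _ => st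
  else
    match st.2 with
    | some s => (st.1 ++ [(s, p.1 - 1)], none)
    | none => (st.1, none)

-- A's trailing 'if start is not None: intervals.append((start, len(window_y)-1))'
def aFlush (r : List (Int × Int) × Option Int) (e : Int) : List (Int × Int) :=
  match r.2 with
  | none => r.1
  | some s => r.1 ++ [(s, e)]

def load_anomaly_intervals (anomaly_labels : List Int) (window_size : Int) : List (Int × Int) :=
  let window_y : List Bool :=
    (PySem.List.pyRange 0 (anomaly_labels.length : Int) 1).foldl
      (fun acc i =>
        acc ++ [PySem.List.max? (PySem.List.slice anomaly_labels (some i) (some (i + window_size))) (fun y => y) == some 1])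
      []
  aFlush ((PySem.List.enumerate window_y 0).foldl aStep ([], none)) ((window_y.length : Int) - 1)

-- ===== PORT B =====
-- B's single right-to-left loop (the recursion processes the suffix first, i.e. descending i):
-- state (n1, nb, end_run, rev)
def altGo (n : Nat) (w : Int) : Nat → List Int → Nat × Nat × Option Int × List (Int × Int)
  | _, [] => (n, n, none, [])
  | i, x :: rest =>
    let r := altGo n w (i + 1) rest
    let n1 := if x == 1 then i else r.1
    let nb := if 1 < x then i else r.2.1
    let e : Int := min ((i : Int) + w) (n : Int)
    let y := decide ((n1 : Int) < e) && decide (e ≤ (nb : Int))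
    if y then
      match r.2.2.1 with
      | none => (n1, nb, some (i : Int), r.2.2.2)
      | some eR => (n1, nb, some eR, r.2.2.2)
    else
      match r.2.2.1 with
      | none => (n1, nb, none, r.2.2.2)
      | some eR => (n1, nb, none, r.2.2.2 ++ [((i : Int) + 1, eR)])

def load_anomaly_intervals_alt (anomaly_labels : List Int) (window_size : Int) : List (Int × Int) :=
  let n := anomaly_labels.length
  let r := altGo n window_size 0 anomaly_labels
  let rev : List (Int × Int) :=
    match r.2.2.1 with
    | none => r.2.2.2
    | some e => r.2.2.2 ++ [((0 : Int), e)]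
  rev.reverse

-- ===== PRECONDITION & SPEC =====
-- Pre_ excludes exactly the inputs where A raises: on a nonempty list with window_size ≤ 0 the
-- slice at the last index is empty and Python's max([]) raises ValueError.
def Pre_load_anomaly_intervals (anomaly_labels : List Int) (window_size : Int) : Prop :=
  anomaly_labels = [] ∨ 1 ≤ window_size
instance (anomaly_labels : List Int) (window_size : Int) : Decidable (Pre_load_anomaly_intervals anomaly_labels window_size) := by unfold Pre_load_anomaly_intervals; infer_instance

def pvWitness_load_anomaly_intervals : List Int × Int := ([0, 1, 2, 1, 0], 2)

def Spec_load_anomaly_intervals (anomaly_labels : List Int) (window_size : Int) (out : List (Int × Int)) : Prop := out = load_anomaly_intervals_alt anomaly_labels window_size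
instance (anomaly_labels : List Int) (window_size : Int) (out : List (Int × Int)) : Decidable (Spec_load_anomaly_intervals anomaly_labels window_size out) := by unfold Spec_load_anomaly_intervals; infer_instance

-- ===== CLAIM (what is proved, stated in full; the proofs are below) =====
def Claim_equal_load_anomaly_intervals : Prop := ∀ (anomaly_labels : List Int) (window_size : Int), Dom_load_anomaly_intervals anomaly_labels window_size → Pre_load_anomaly_intervals anomaly_labels window_size → Spec_load_anomaly_intervals anomaly_labels window_size (load_anomaly_intervals anomaly_labels window_size)

-- ===== LEMMAS AND PROOFS =====

mutual
def specClosed : Int → List Bool → List (Int × Int)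
  | _, [] => []
  | i, b :: bs => if b then specOpen i (i + 1) bs else specClosed (i + 1) bs
def specOpen : Int → Int → List Bool → List (Int × Int)
  | s, i, [] => [(s, i - 1)]
  | s, i, b :: bs => if b then specOpen s (i + 1) bs else (s, i - 1) :: specClosed (i + 1) bs
end

lemma afold_spec : ∀ (ys : List Bool) (i : Int) (acc : List (Int × Int)) (st : Option Int),
    aFlush ((PySem.List.enumerate ys i).foldl aStep (acc, st)) (i + ys.length - 1) =
      acc ++ (match st with | none => specClosed i ys | some s => specOpen s i ys) := by
  intro ys
  induction ys with
  | nil =>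
    intro i acc st
    cases st <;> simp [PySem.List.enumerate, aFlush, specClosed, specOpen]
  | cons b bs ih =>
    intro i acc st
    rw [PySem.List.enumerate_cons]
    have harith : i + (b :: bs).length - 1 = (i + 1) + bs.length - 1 := by
      push_cast [List.length_cons]; ring
    rw [harith, List.foldl_cons]
    cases b <;> cases st <;>
      simp only [aStep, specClosed, specOpen, if_true, if_false, Bool.false_eq_true, ite_false, ite_true] <;>
      rw [ih] <;> simp [specClosed, specOpen]

def mergeR : Int → List Bool → Option Int × List (Int × Int)
  | _, [] => (none, [])
  | i, b :: bs =>
    let r := mergeR (i + 1) bs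
    if b then
      match r.1 with
      | none => (some i, r.2)
      | some e => (some e, r.2)
    else
      match r.1 with
      | none => (none, r.2)
      | some e => (none, r.2 ++ [(i + 1, e)])

lemma mR_ff (i : Int) (bs : List Bool) (h : (mergeR (i + 1) bs).1 = none) :
    mergeR i (false :: bs) = (none, (mergeR (i + 1) bs).2) := by
  simp [mergeR, h]

lemma mR_fs (i e : Int) (bs : List Bool) (h : (mergeR (i + 1) bs).1 = some e) :
    mergeR i (false :: bs) = (none, (mergeR (i + 1) bs).2 ++ [(i + 1, e)]) := by
  simp [mergeR, h]

lemma mR_tf (i : Int) (bs : List Bool) (h : (mergeR (i + 1) bs).1 = none) :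
    mergeR i (true :: bs) = (some i, (mergeR (i + 1) bs).2) := by
  simp [mergeR, h]

lemma mR_ts (i e : Int) (bs : List Bool) (h : (mergeR (i + 1) bs).1 = some e) :
    mergeR i (true :: bs) = (some e, (mergeR (i + 1) bs).2) := by
  simp [mergeR, h]

lemma sC_f (i : Int) (bs : List Bool) : specClosed i (false :: bs) = specClosed (i + 1) bs := by
  simp [specClosed]

lemma sC_t (i : Int) (bs : List Bool) : specClosed i (true :: bs) = specOpen i (i + 1) bs := by
  simp [specClosed]

lemma sO_f (s i : Int) (bs : List Bool) :
    specOpen s i (false :: bs) = (s, i - 1) :: specClosed (i + 1) bs := by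
  simp [specOpen]

lemma sO_t (s i : Int) (bs : List Bool) : specOpen s i (true :: bs) = specOpen s (i + 1) bs := by
  simp [specOpen]

lemma mergeR_spec : ∀ (ys : List Bool) (i : Int),
    ((mergeR i ys).1 = none → ((mergeR i ys).2.reverse = specClosed i ys ∧ ys.head? ≠ some true))
    ∧ (∀ e, (mergeR i ys).1 = some e →
        (ys.head? = some true ∧ ∀ s : Int, (s, e) :: (mergeR i ys).2.reverse = specOpen s i ys)) := by
  intro ys
  induction ys with
  | nil => intro i; simp [mergeR, specClosed]
  | cons b bs ih =>
    intro i
    obtain ⟨ihn, ihs⟩ := ih (i + 1)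
    cases b
    · -- b = false
      rcases her : (mergeR (i + 1) bs).1 with _ | e
      · obtain ⟨h1, _⟩ := ihn her
        rw [mR_ff i bs her]
        refine ⟨fun _ => ⟨?_, by simp⟩, fun e he => by simp at he⟩
        rw [sC_f]; exact h1
      · obtain ⟨hhd, hall⟩ := ihs e her
        rw [mR_fs i e bs her]
        refine ⟨fun _ => ⟨?_, by simp⟩, fun e' he' => by simp at he'⟩
        cases bs with
        | nil => simp at hhd
        | cons b' bs' =>
          cases b'
          · simp at hhd
          · have h := hall (i + 1)
            rw [sO_t] at h
            rw [sC_f, sC_t, List.reverse_append, ← h]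
            simp
    · -- b = true
      rcases her : (mergeR (i + 1) bs).1 with _ | e
      · obtain ⟨h1, h2⟩ := ihn her
        rw [mR_tf i bs her]
        refine ⟨fun hn => by simp at hn, fun e' he' => ?_⟩
        obtain rfl : e' = i := by simpa using he'.symm
        refine ⟨rfl, fun s => ?_⟩
        rw [sO_t]
        cases bs with
        | nil => simp [specOpen, mergeR]
        | cons b' bs' =>
          cases b'
          · rw [sO_f]
            rw [sC_f] at h1
            rw [h1]
            norm_num
          · simp at h2
      · obtain ⟨hhd, hall⟩ := ihs e her
        rw [mR_ts i e bs her]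
        refine ⟨fun hn => by simp at hn, fun e' he' => ?_⟩
        obtain rfl : e' = e := by simpa using he'.symm
        refine ⟨rfl, fun s => ?_⟩
        rw [sO_t]
        exact hall s

def yb (xs : List Int) (w : Int) (i : Nat) : Bool :=
  decide ((((i + ((xs.drop i).findIdx (fun x => x == 1))) : Nat) : Int) < min ((i : Int) + w) (xs.length : Int)
    ∧ min ((i : Int) + w) ((xs.length : Int)) ≤ (((i + ((xs.drop i).findIdx (fun x => decide (1 < x)))) : Nat) : Int))

lemma max1_iff (s : List Int) (hne : s ≠ []) :
    (PySem.List.max? s (fun y => y) = some 1) ↔ (1 ∈ s ∧ ∀ y ∈ s, y ≤ 1) := by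
  constructor
  · intro h
    exact ⟨PySem.List.max?_mem h, fun y hy => PySem.List.max?_isMax h y hy⟩
  · rintro ⟨h1, hle⟩
    rcases h : PySem.List.max? s (fun y => y) with _ | m
    · exact absurd ((PySem.List.max?_eq_none_iff s (fun y => y)).mp h) hne
    · have hm : m ∈ s := PySem.List.max?_mem h
      have h1m : (1 : Int) ≤ m := PySem.List.max?_isMax h 1 h1
      have hm1 : m ≤ 1 := hle m hm
      congr 1
      omega

lemma findIdx_take (l : List Int) (p : Int → Bool) (k : Nat) :
    (∃ y ∈ l.take k, p y = true) ↔ l.findIdx p < min k l.length := by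
  constructor
  · rintro ⟨y, hy, hp⟩
    obtain ⟨j, hj, rfl⟩ := List.getElem_of_mem hy
    have hj' : j < min k l.length := by simpa using hj
    have hgl : (l.take k)[j] = l[j]'(by omega) := by
      simp [List.getElem_take]
    rw [hgl] at hp
    by_contra hc
    have hlt : j < l.findIdx p := by omega
    exact absurd hp (by simpa using List.not_of_lt_findIdx hlt)
  · intro h
    have hlen : l.findIdx p < l.length := by omega
    refine ⟨l[l.findIdx p]'hlen, ?_, List.findIdx_getElem⟩
    have : (l.take k)[l.findIdx p]'(by simpa using h) = l[l.findIdx p]'hlen := by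
      simp [List.getElem_take]
    rw [← this]
    exact List.getElem_mem _

lemma key_window (xs : List Int) (w : Int) (i : Nat) (hi : i < xs.length) (hw : 1 ≤ w) :
    (PySem.List.max? (PySem.List.slice xs (some (i : Int)) (some ((i : Int) + w))) (fun y => y) == some 1)
      = yb xs w i := by
  have hcast : (i : Int) + w = ((i + w.toNat : Nat) : Int) := by push_cast; omega
  rw [hcast, PySem.List.slice_natCast]
  have hsub : i + w.toNat - i = w.toNat := by omega
  rw [hsub]
  set s := (xs.drop i).take w.toNat with hs
  have hlen : s.length = min w.toNat (xs.length - i) := by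
    simp [hs]
  have hne : s ≠ [] := by
    have : 0 < s.length := by rw [hlen]; omega
    exact List.ne_nil_of_length_pos this
  have hdl : (xs.drop i).length = xs.length - i := by simp
  have h1 : (1 ∈ s) ↔ (xs.drop i).findIdx (fun x => x == 1) < min w.toNat ((xs.drop i).length) := by
    rw [← findIdx_take]
    constructor
    · intro hm
      exact ⟨1, hm, by simp⟩
    · rintro ⟨y, hy, hp⟩
      have : y = 1 := by simpa using hp
      rwa [this] at hy
  have h2 : (∀ y ∈ s, y ≤ 1) ↔ ¬ ((xs.drop i).findIdx (fun x => decide (1 < x)) < min w.toNat ((xs.drop i).length)) := by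
    rw [← findIdx_take]
    constructor
    · rintro h ⟨y, hy, hp⟩
      exact absurd (h y hy) (by simpa using hp)
    · intro h y hy
      by_contra hc
      exact h ⟨y, hy, by simpa using hc⟩
  have hbound1 : (xs.drop i).findIdx (fun x => x == 1) ≤ xs.length - i := by
    have := List.findIdx_le_length (p := fun x : Int => x == 1) (xs := xs.drop i)
    simpa using this
  have hbound2 : (xs.drop i).findIdx (fun x => decide (1 < x)) ≤ xs.length - i := by
    have := List.findIdx_le_length (p := fun x : Int => decide (1 < x)) (xs := xs.drop i)
    simpa using this
  rw [Bool.eq_iff_iff]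
  simp only [beq_iff_eq, yb, decide_eq_true_eq]
  rw [max1_iff s hne, h1, h2]
  omega

lemma altGo_spec (xs : List Int) (w : Int) : ∀ (t : List Int) (i : Nat),
    i + t.length = xs.length → t = xs.drop i →
    altGo xs.length w i t =
      (i + t.findIdx (fun x => x == 1), i + t.findIdx (fun x => decide (1 < x)),
        mergeR (i : Int) ((List.range t.length).map (fun j => yb xs w (i + j)))) := by
  intro t
  induction t with
  | nil =>
    intro i hlen _
    have : i = xs.length := by simpa using hlen
    subst this
    simp [altGo, mergeR]
  | cons x rest ih =>
    intro i hlen ht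
    have hrest : rest = xs.drop (i + 1) := by
      rw [← List.tail_drop, ← ht]
      rfl
    have hlen' : (i + 1) + rest.length = xs.length := by
      simp at hlen; omega
    have hih := ih (i + 1) hlen' hrest
    -- the bool computed by altGo at index i is yb xs w i
    have hyb : ∀ (a b : Nat),
        a = i + (x :: rest).findIdx (fun x => x == 1) →
        b = i + (x :: rest).findIdx (fun x => decide (1 < x)) →
        (decide ((a : Int) < min ((i : Int) + w) (xs.length : Int)) &&
         decide (min ((i : Int) + w) (xs.length : Int) ≤ (b : Int))) = yb xs w i := by
      intro a b ha hb
      rw [yb, Bool.decide_and, ← ht, ha, hb]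
    -- the mapped range splits off its head
    have hsplit : (List.range (x :: rest).length).map (fun j => yb xs w (i + j))
        = yb xs w i :: (List.range rest.length).map (fun j => yb xs w ((i + 1) + j)) := by
      rw [List.length_cons, List.range_succ_eq_map, List.map_cons, List.map_map]
      refine congrArg₂ _ (by simp) ?_
      refine List.map_congr_left (fun j _ => ?_)
      simp only [Function.comp_apply]
      congr 1
      omega
    have hn1 : (if x == 1 then i else (i + 1) + rest.findIdx (fun x => x == 1))
        = i + (x :: rest).findIdx (fun x => x == 1) := by
      rw [List.findIdx_cons]
      cases h : (x == 1 : Bool) <;> simp [h] <;> omega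
    have hnb : (if 1 < x then i else (i + 1) + rest.findIdx (fun x => decide (1 < x)))
        = i + (x :: rest).findIdx (fun x => decide (1 < x)) := by
      rw [List.findIdx_cons]
      by_cases h : 1 < x <;> simp [h] <;> omega
    show altGo xs.length w i (x :: rest) = _
    rw [altGo, hih, hsplit]
    simp only []
    rw [hn1, hnb]
    rw [hyb _ _ rfl rfl]
    have hc : ((i + 1 : Nat) : Int) = (i : Int) + 1 := by push_cast; ring
    rw [hc]
    set ys' := List.map (fun j => yb xs w (i + 1 + j)) (List.range rest.length) with hys
    cases hy : yb xs w i <;> rcases hm : (mergeR ((i : Int) + 1) ys').1 with _ | e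
    · rw [mR_ff _ _ hm]
      simp [hm]
    · rw [mR_fs _ _ _ hm]
      simp [hm]
    · rw [mR_tf _ _ hm]
      simp [hm]
    · rw [mR_ts _ _ _ hm]
      simp [hm]

-- ===== VERDICT (by name: the statement is the Claim_ definition above) =====
theorem load_anomaly_intervals_spec : Claim_equal_load_anomaly_intervals := by
  unfold Claim_equal_load_anomaly_intervals
  intro xs w _ hpre
  unfold Spec_load_anomaly_intervals
  unfold Pre_load_anomaly_intervals at hpre
  rcases hpre with rfl | hw
  · rfl
  · set n := xs.length with hn
    set ys := (List.range n).map (yb xs w) with hys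
    -- A side
    have hwy : (PySem.List.pyRange 0 (n : Int) 1).foldl
        (fun acc i =>
          acc ++ [PySem.List.max? (PySem.List.slice xs (some i) (some (i + w))) (fun y => y) == some 1])
        [] = ys := by
      rw [PySem.List.pyRange_zero_natCast, PySem.List.foldl_append_singleton_eq_map, List.map_map,
        List.nil_append, hys]
      refine List.map_congr_left (fun i hi => ?_)
      have hi' : i < n := List.mem_range.mp hi
      exact key_window xs w i hi' hw
    have hA : load_anomaly_intervals xs w = specClosed 0 ys := by
      rw [load_anomaly_intervals]
      simp only [← hn, hwy]
      have := afold_spec ys 0 [] none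
      simpa using this
    -- B side
    have hB0 : altGo n w 0 xs = (xs.findIdx (fun x => x == 1), xs.findIdx (fun x => decide (1 < x)),
        mergeR 0 ys) := by
      have := altGo_spec xs w xs 0 (by simp [hn]) (by simp)
      simpa [hys] using this
    rw [hA, load_anomaly_intervals_alt]
    simp only [← hn, hB0]
    clear_value ys
    rcases hm : (mergeR 0 ys).1 with _ | e
    · obtain ⟨h1, _⟩ := (mergeR_spec ys 0).1 hm
      simp only [hm, h1]
    · obtain ⟨hhd, hall⟩ := (mergeR_spec ys 0).2 e hm
      have h0 := hall 0
      rcases ys with _ | ⟨b, t⟩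
      · simp at hhd
      · obtain rfl : b = true := by simpa using hhd
        rw [sO_t] at h0
        simp only [hm, List.reverse_append]
        rw [sC_t]
        norm_num at h0 ⊢
        rw [← h0]
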